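-- pv_equiv track=rewrite | github.com/8bitHermitcrab/CoTeStudy | 고인정/프로그래머스/Lv1/Lv1_dont_have_numbers_sum.py | solution
-- ===== SOURCE A (Python) =====
-- def solution(numbers):
--     answer = 0
--     nums = [0, 1, 2, 3, 4, 5, 6, 7, 8, 9]
--     numbers.sort()
--
--     for i in range(len(numbers)):
--         if numbers[i] in nums:
--             nums.remove(numbers[i])
--
--     return sum(nums)
-- ===== SOURCE B (Python) =====
-- def solution(numbers):
--     numbers.sort()
--     return sum(d for d in range(10) if d not in numbers)
-- ===== Notes on version B (the rewrite author's own statement) =====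
-- stated objective: simpler
-- what changed: Iterate over the candidate digits 0..9 and sum those absent from the input, instead of walking the input and removing matched digits from a mutable digit list; the sort is kept only for A's observable in-place side effect.
import Mathlib
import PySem

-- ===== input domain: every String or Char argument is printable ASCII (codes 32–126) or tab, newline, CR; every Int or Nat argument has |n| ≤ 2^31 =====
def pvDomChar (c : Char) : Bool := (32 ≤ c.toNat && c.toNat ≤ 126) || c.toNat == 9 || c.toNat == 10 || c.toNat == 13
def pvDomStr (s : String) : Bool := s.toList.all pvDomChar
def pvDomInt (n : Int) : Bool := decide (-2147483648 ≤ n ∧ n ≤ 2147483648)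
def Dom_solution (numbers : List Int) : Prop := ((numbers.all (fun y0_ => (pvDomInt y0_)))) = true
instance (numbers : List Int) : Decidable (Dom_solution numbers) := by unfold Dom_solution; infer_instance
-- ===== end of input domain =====

-- B iterates over the ten candidate digits and sums those absent from the input, instead of
-- removing matched digits from a mutable digit list while walking the input (objective: simpler).
-- Both Pythons sort `numbers` in place; the equivalence proved here is about the return value.

-- ===== PORT A =====
def solution (numbers : List Int) : Int :=
  let numbersS := PySem.List.sorted numbers (fun x => x) false
  let nums : List Int :=
    (PySem.List.pyRange 0 (PySem.List.len numbersS) 1).foldl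
      (fun nums i =>
        if PySem.List.pyGetD numbersS i 0 ∈ nums then
          (PySem.List.remove? nums (PySem.List.pyGetD numbersS i 0)).getD nums
        else nums)
      [0, 1, 2, 3, 4, 5, 6, 7, 8, 9]
  nums.sum

-- ===== PORT B =====
def solution_alt (numbers : List Int) : Int :=
  let numbersS := PySem.List.sorted numbers (fun x => x) false
  (PySem.List.pyRange 0 10 1).foldl (fun t d => if d ∈ numbersS then t else t + d) 0

-- ===== PRECONDITION & SPEC =====
def Spec_solution (numbers : List Int) (out : Int) : Prop := out = solution_alt numbers
instance (numbers : List Int) (out : Int) : Decidable (Spec_solution numbers out) := by unfold Spec_solution; infer_instance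

-- ===== CLAIM (what is proved, stated in full; the proofs are below) =====
def Claim_equal_solution : Prop := ∀ (numbers : List Int), Dom_solution numbers → Spec_solution numbers (solution numbers)

-- ===== LEMMAS AND PROOFS =====

-- A's loop: folding the remove-if-present step over the input leaves exactly the digits not in the input.
theorem removeFold_eq_filter (xs : List Int) : ∀ (nums : List Int), nums.Nodup →
    xs.foldl (fun nums x => if x ∈ nums then (PySem.List.remove? nums x).getD nums else nums) nums
      = nums.filter (fun d => !decide (d ∈ xs)) := by
  induction xs with
  | nil => intro nums _; simp
  | cons x t ih =>
    intro nums hnd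
    simp only [List.foldl_cons]
    by_cases hx : x ∈ nums
    · rw [if_pos hx, PySem.List.remove?_eq_some_erase nums x hx, Option.getD_some,
        ih _ (hnd.erase x), hnd.erase_eq_filter]
      rw [List.filter_filter]
      apply List.filter_congr
      intro d _
      by_cases hdx : d = x <;> simp [hdx]
    · rw [if_neg hx, ih _ hnd]
      apply List.filter_congr
      intro d hd
      have hdx : d ≠ x := fun h => hx (h ▸ hd)
      simp [hdx]

-- B's loop: the conditional accumulating fold is the sum of the filtered list.
theorem condSumFold_eq_filter_sum (ns : List Int) (l : List Int) : ∀ (t : Int),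
    l.foldl (fun t d => if d ∈ ns then t else t + d) t
      = t + (l.filter (fun d => !decide (d ∈ ns))).sum := by
  induction l with
  | nil => intro t; simp
  | cons x l ih =>
    intro t
    simp only [List.foldl_cons, List.filter_cons]
    by_cases hx : x ∈ ns
    · simp [hx, ih]
    · simp only [ih, hx, decide_false] at *
      simp
      omega

-- ===== VERDICT (by name: the statement is the Claim_ definition above) =====
theorem solution_spec : Claim_equal_solution := by
  intro numbers _
  unfold Spec_solution solution solution_alt
  simp only []
  rw [PySem.List.foldl_pyRange_zero_pyGetD
        (f := fun nums x => if x ∈ nums then (PySem.List.remove? nums x).getD nums else nums)]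
  rw [removeFold_eq_filter _ _ (by decide)]
  have hr : PySem.List.pyRange 0 10 1 = [0, 1, 2, 3, 4, 5, 6, 7, 8, 9] := by decide
  rw [hr, condSumFold_eq_filter_sum]
  simp
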